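-- pv_equiv track=rewrite | github.com/Beefster09/esolangs | hanoiing.py | get_line_indices
-- ===== SOURCE A (Python) =====
-- def get_line_indices(s):
--     yield 0
--     idx = 0
--     while True:
--         idx = s.find('\n', idx) + 1
--         yield idx
--         if idx == 0:
--             break
-- ===== SOURCE B (Python) =====
-- def get_line_indices(s):
--     yield 0
--     for i, ch in enumerate(s):
--         if ch == '\n':
--             yield i + 1
--     yield 0
-- ===== Notes on version B (the rewrite author's own statement) =====
-- stated objective: simpler
-- what changed: Replaces the delimiter-jumping str.find loop (repeated searches with a moving start index and a sentinel-driven break) by a single left-to-right enumerate scan that yields i+1 at each newline, with the leading and trailing 0 yielded explicitly.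
import Mathlib
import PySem

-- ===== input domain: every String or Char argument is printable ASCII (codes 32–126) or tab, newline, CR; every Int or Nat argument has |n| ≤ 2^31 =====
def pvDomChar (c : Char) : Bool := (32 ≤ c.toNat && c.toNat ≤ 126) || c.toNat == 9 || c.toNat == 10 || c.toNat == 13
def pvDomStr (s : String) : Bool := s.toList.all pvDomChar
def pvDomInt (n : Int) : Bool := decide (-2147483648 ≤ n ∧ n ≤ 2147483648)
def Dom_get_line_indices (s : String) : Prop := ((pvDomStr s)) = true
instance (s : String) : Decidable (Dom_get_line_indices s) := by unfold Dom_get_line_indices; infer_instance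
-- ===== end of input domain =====

-- B replaces A's repeated str.find delimiter-jumping by one left-to-right enumerate scan (objective: simpler).

-- ===== PORT A =====
-- A's while-True loop: idx = s.find('\n', idx) + 1; yield idx; break when idx == 0.
-- fuel only makes the recursion total; it never runs out on any input (fuel = len + 1 suffices,
-- since idx strictly increases while the loop continues).
def pvLoopA (s : List Char) : Nat → Nat → List Int
  | 0, _ => []
  | fuel + 1, idx =>
    let nidx : Int := PySem.Chars.findFrom s ['\n'] (idx : Int) none + 1
    nidx :: (if nidx = 0 then [] else pvLoopA s fuel nidx.toNat)

def get_line_indices (s : String) : List Int :=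
  0 :: pvLoopA s.toList (s.toList.length + 1) 0

-- ===== PORT B =====
-- B: yield 0; for i, ch in enumerate(s): if ch == '\n': yield i + 1; yield 0
def get_line_indices_alt (s : String) : List Int :=
  ((PySem.List.enumerate s.toList 0).foldl
    (fun acc p => if p.2 = '\n' then acc ++ [p.1 + 1] else acc) [0]) ++ [0]

-- ===== PRECONDITION & SPEC =====
def Spec_get_line_indices (s : String) (out : List Int) : Prop := out = get_line_indices_alt s
instance (s : String) (out : List Int) : Decidable (Spec_get_line_indices s out) := by unfold Spec_get_line_indices; infer_instance

-- ===== CLAIM (what is proved, stated in full; the proofs are below) =====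
def Claim_equal_get_line_indices : Prop := ∀ (s : String), Dom_get_line_indices s → Spec_get_line_indices s (get_line_indices s)

-- ===== LEMMAS AND PROOFS =====

-- common characterisation: the positions just after each newline of l, l starting at index k
def pvNlpos (l : List Char) (k : Nat) : List Int :=
  match l with
  | [] => []
  | c :: t => if c = '\n' then ((k : Int) + 1) :: pvNlpos t (k + 1) else pvNlpos t (k + 1)

theorem pvNlpos_of_not_mem (l : List Char) (k : Nat) (h : '\n' ∉ l) : pvNlpos l k = [] := by
  induction l generalizing k with
  | nil => rfl
  | cons c t ih =>
    simp only [List.mem_cons, not_or] at h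
    have hc : ¬ c = '\n' := fun hh => h.1 hh.symm
    simp [pvNlpos, hc, ih _ h.2]

theorem pvNlpos_first (l : List Char) (j k : Nat)
    (hj : l[j]? = some '\n') (hmin : ∀ i < j, l[i]? ≠ some '\n') :
    pvNlpos l k = ((k + j + 1 : Int)) :: pvNlpos (l.drop (j + 1)) (k + j + 1) := by
  induction j generalizing l k with
  | zero =>
    cases l with
    | nil => simp at hj
    | cons c t =>
      simp at hj
      subst hj
      simp [pvNlpos]
  | succ j ih =>
    cases l with
    | nil => simp at hj
    | cons c t =>
      have hc : c ≠ '\n' := by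
        intro h; exact (hmin 0 (by omega)) (by simp [h])
      have hj' : t[j]? = some '\n' := by simpa using hj
      have hmin' : ∀ i < j, t[i]? ≠ some '\n' := by
        intro i hi h
        exact (hmin (i + 1) (by omega)) (by simpa using h)
      simp only [pvNlpos, if_neg hc]
      rw [ih t (k + 1) hj' hmin']
      simp only [List.drop_succ_cons]
      congr 1
      · push_cast; ring
      · congr 1; omega

theorem singleton_prefix_iff (a : Char) (l : List Char) : [a] <+: l ↔ l[0]? = some a := by
  cases l with
  | nil => simp
  | cons c t =>
    constructor
    · rintro ⟨u, hu⟩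
      simp at hu
      simp [hu.1]
    · intro h
      simp at h
      exact ⟨t, by simp [h]⟩

theorem singleton_infix_iff (a : Char) (l : List Char) : [a] <:+: l ↔ a ∈ l := by
  constructor
  · rintro ⟨u, v, huv⟩
    subst huv; simp
  · intro h
    obtain ⟨u, v, huv⟩ := List.append_of_mem h
    exact ⟨u, v, by simp [huv]⟩

-- A's loop computes pvNlpos of the tail from idx, followed by the trailing 0
theorem pvLoopA_eq (s : List Char) (fuel idx : Nat)
    (hidx : idx ≤ s.length) (hfuel : s.length - idx < fuel) :
    pvLoopA s fuel idx = pvNlpos (s.drop idx) idx ++ [0] := by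
  induction fuel generalizing idx with
  | zero => omega
  | succ fuel ih =>
    have hff := PySem.Chars.findFrom_natCast s ['\n'] idx hidx
    by_cases hf : PySem.Chars.find (s.drop idx) ['\n'] = -1
    · have hnm : '\n' ∉ s.drop idx := by
        have := (PySem.Chars.find_eq_neg_one_iff (s.drop idx) ['\n']).mp hf
        intro hm; exact this ((singleton_infix_iff _ _).mpr hm)
      simp only [pvLoopA, hff, if_pos hf]
      norm_num
      simp [pvNlpos_of_not_mem _ _ hnm]
    · have hnn : 0 ≤ PySem.Chars.find (s.drop idx) ['\n'] := by
        rcases (PySem.Chars.neg_one_le_find (s.drop idx) ['\n']).lt_or_eq with h | h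
        · omega
        · exact absurd h.symm hf
      set f := PySem.Chars.find (s.drop idx) ['\n'] with hfdef
      obtain ⟨hpre, hmin⟩ := PySem.Chars.find_spec (s := s.drop idx) (sub := ['\n']) hnn
      set j := f.toNat with hjdef
      have hjget : (s.drop idx)[j]? = some '\n' := by
        have h0 := (singleton_prefix_iff '\n' _).mp hpre
        simpa [List.getElem?_drop] using h0
      have hjmin : ∀ i < j, (s.drop idx)[i]? ≠ some '\n' := by
        intro i hi h
        exact hmin i hi ((singleton_prefix_iff _ _).mpr (by simpa [List.getElem?_drop] using h))
      have hjlt : j < (s.drop idx).length := by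
        have := List.getElem?_eq_some_iff.mp hjget
        exact this.1
      have hjlen : idx + j < s.length := by
        simp [List.length_drop] at hjlt; omega
      have hfj : f = (j : Int) := by omega
      simp only [pvLoopA, hff, if_neg hf]
      have hne : f + 1 + 1 ≠ (0 : Int) := by omega
      have hnidx : ((idx : Int) + f + 1) ≠ 0 := by omega
      rw [if_neg hnidx]
      have htn : ((idx : Int) + f + 1).toNat = idx + j + 1 := by omega
      rw [htn, ih (idx + j + 1) (by omega) (by omega)]
      rw [pvNlpos_first (s.drop idx) j idx hjget hjmin]
      simp only [List.drop_drop]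
      have h2 : idx + (j + 1) = idx + j + 1 := by omega
      rw [hfj, h2]
      simp

-- B's fold computes the same list
theorem foldB_eq (l : List Char) (k : Nat) (acc : List Int) :
    (PySem.List.enumerate l (k : Int)).foldl
      (fun acc p => if p.2 = '\n' then acc ++ [p.1 + 1] else acc) acc
    = acc ++ pvNlpos l k := by
  induction l generalizing k acc with
  | nil => simp [PySem.List.enumerate_nil, pvNlpos]
  | cons c t ih =>
    rw [PySem.List.enumerate_cons]
    simp only [List.foldl_cons]
    by_cases hc : c = '\n'
    · have : ((k : Int) + 1) = ((k + 1 : Nat) : Int) := by push_cast; ring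
      rw [if_pos hc, this, ih (k + 1)]
      simp [pvNlpos, hc]
    · have : ((k : Int) + 1) = ((k + 1 : Nat) : Int) := by push_cast; ring
      rw [if_neg hc, this, ih (k + 1)]
      simp [pvNlpos, hc]

-- ===== VERDICT (by name: the statement is the Claim_ definition above) =====
theorem get_line_indices_spec : Claim_equal_get_line_indices := by
  intro s _
  unfold Spec_get_line_indices get_line_indices get_line_indices_alt
  rw [pvLoopA_eq s.toList (s.toList.length + 1) 0 (by omega) (by omega)]
  have hB := foldB_eq s.toList 0 [0]
  norm_num at hB
  rw [hB]
  simp
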